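-- pv_equiv track=rewrite | github.com/bluecarr0t/sage-resources-subdomain | scripts/combine-csv-with-google-data.py | create_property_lookup
-- ===== SOURCE A (Python) =====
-- def create_property_lookup(google_data):
--     """Create a lookup dictionary by property_name."""
--     lookup = {}
--     for prop in google_data:
--         prop_name = prop.get('property_name', '').strip()
--         if prop_name:
--             # Store the first occurrence (or you could merge if there are duplicates)
--             if prop_name not in lookup:
--                 lookup[prop_name] = prop
--             else:
--                 # If duplicate, prefer the one with more Google data
--                 existing = lookup[prop_name]
--                 existing_count = sum(1 for k, v in existing.items()
--                                    if k.startswith('google_') and v is not None)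
--                 new_count = sum(1 for k, v in prop.items()
--                               if k.startswith('google_') and v is not None)
--                 if new_count > existing_count:
--                     lookup[prop_name] = prop
--
--     return lookup
-- ===== SOURCE B (Python) =====
-- def create_property_lookup(google_data):
--     """Create a lookup dictionary by property_name (per first-seen name, pick the
--     entry with the most Google data from the whole list; max keeps the earliest on ties)."""
--     def name_of(p):
--         return p.get('property_name', '').strip()
--
--     def google_count(p):
--         return sum(1 for k, v in p.items() if k.startswith('google_') and v is not None)
--
--     result = {}
--     for prop in google_data:
--         n = name_of(prop)
--         if n and n not in result:
--             result[n] = max((p for p in google_data if name_of(p) == n), key=google_count)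
--     return result
-- ===== Notes on version B (the rewrite author's own statement) =====
-- stated objective: alternative
-- what changed: Replaced A's incremental keep-first/strict-replace dict loop by a select-at-first-occurrence structure: when a stripped name is first seen, B scans the whole list once and stores max(matching props, key=google_count); max keeps the earliest maximal element, which matches A's strict-greater-than replacement rule, at the cost of a nested scan instead of a running comparison.
import Mathlib
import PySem

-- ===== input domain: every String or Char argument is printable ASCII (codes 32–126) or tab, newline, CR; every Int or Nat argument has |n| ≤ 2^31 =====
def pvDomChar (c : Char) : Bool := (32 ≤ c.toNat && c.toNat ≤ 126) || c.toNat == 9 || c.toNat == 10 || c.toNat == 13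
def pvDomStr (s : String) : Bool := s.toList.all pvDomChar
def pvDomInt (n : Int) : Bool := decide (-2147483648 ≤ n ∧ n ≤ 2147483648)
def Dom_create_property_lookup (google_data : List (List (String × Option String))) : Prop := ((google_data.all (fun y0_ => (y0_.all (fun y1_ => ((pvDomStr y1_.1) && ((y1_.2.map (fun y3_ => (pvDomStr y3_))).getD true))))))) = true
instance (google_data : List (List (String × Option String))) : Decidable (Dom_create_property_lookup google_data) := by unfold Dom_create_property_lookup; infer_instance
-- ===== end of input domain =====

-- B replaces A's incremental keep-first/strict-replace dict loop by a select-at-first-occurrence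
-- structure: at each name's first occurrence it picks max over the whole list by google_count
-- (objective: alternative decomposition; B is not faster).
-- Each inner association list models a Python dict (PySem.Dict.ofList), as in the type convention.

-- ===== PORT A =====
-- sum(1 for k, v in p.items() if k.startswith('google_') and v is not None)
def pvCountA (p : List (String × Option String)) : Int :=
  (p.map (fun kv => if PySem.Str.startswith kv.1 "google_" && kv.2.isSome then (1 : Int) else 0)).sum

-- the body of A's 'for prop in google_data' loop
def pvStepA (lookup : PySem.Dict String (List (String × Option String)))
    (prop : List (String × Option String)) : PySem.Dict String (List (String × Option String)) :=
  let d := PySem.Dict.ofList prop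
  -- prop.get('property_name', '').strip(); the inner '.getD ""' only totalizes the port:
  -- Pre_ excludes a stored None value, on which Python raises AttributeError
  let prop_name := PySem.Str.strip ((PySem.Dict.getD d "property_name" (some "")).getD "")
  if prop_name ≠ "" then
    if PySem.Dict.contains lookup prop_name = false then
      PySem.Dict.insert lookup prop_name d.items
    else
      let existing := PySem.Dict.getD lookup prop_name []
      let existing_count := pvCountA existing
      let new_count := pvCountA d.items
      if new_count > existing_count then PySem.Dict.insert lookup prop_name d.items
      else lookup
  else lookup

def create_property_lookup (google_data : List (List (String × Option String))) :
    List (String × List (String × Option String)) :=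
  (google_data.foldl pvStepA PySem.Dict.empty).items

-- ===== PORT B =====
-- B's name_of helper: p.get('property_name', '').strip()
def pv_name_of (p : List (String × Option String)) : String :=
  PySem.Str.strip ((PySem.Dict.getD (PySem.Dict.ofList p) "property_name" (some "")).getD "")

-- B's google_count helper
def google_count (p : List (String × Option String)) : Int :=
  (p.map (fun kv => if PySem.Str.startswith kv.1 "google_" && kv.2.isSome then (1 : Int) else 0)).sum

-- the body of B's loop: at a name's first occurrence, scan the whole list and keep
-- max((p for p in google_data if name_of(p) == n), key=google_count)
def pvStepC (google_data : List (List (String × Option String)))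
    (result : PySem.Dict String (List (String × Option String)))
    (prop : List (String × Option String)) : PySem.Dict String (List (String × Option String)) :=
  let n := pv_name_of prop
  if n ≠ "" ∧ result.contains n = false then
    result.insert n (PySem.List.maxD
      ((google_data.filter (fun q => pv_name_of q == n)).map (fun q => (PySem.Dict.ofList q).items))
      google_count [])
  else result

def create_property_lookup_alt (google_data : List (List (String × Option String))) :
    List (String × List (String × Option String)) :=
  (google_data.foldl (pvStepC google_data) PySem.Dict.empty).items

-- ===== PRECONDITION & SPEC =====
-- Pre_ excludes exactly the inputs where some prop stores None under 'property_name':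
-- there Python's None.strip() raises AttributeError (in A and in B alike).
def Pre_create_property_lookup (google_data : List (List (String × Option String))) : Prop :=
  ∀ prop ∈ google_data, (PySem.Dict.ofList prop).get? "property_name" ≠ some none
instance (google_data : List (List (String × Option String))) : Decidable (Pre_create_property_lookup google_data) := by unfold Pre_create_property_lookup; infer_instance

def pvWitness_create_property_lookup : (List (List (String × Option String))) :=
  [[("property_name", some " Sage Lodge "), ("google_rating", some "4.7")],
   [("property_name", some "Sage Lodge"), ("google_rating", none)]]

def Spec_create_property_lookup (google_data : List (List (String × Option String))) (out : List (String × List (String × Option String))) : Prop := out = create_property_lookup_alt google_data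
instance (google_data : List (List (String × Option String))) (out : List (String × List (String × Option String))) : Decidable (Spec_create_property_lookup google_data out) := by unfold Spec_create_property_lookup; infer_instance

-- ===== CLAIM (what is proved, stated in full; the proofs are below) =====
def Claim_equal_create_property_lookup : Prop := ∀ (google_data : List (List (String × Option String))), Dom_create_property_lookup google_data → Pre_create_property_lookup google_data → Spec_create_property_lookup google_data (create_property_lookup google_data)

-- ===== LEMMAS AND PROOFS =====

-- proof-side grouping accumulator (neither port computes it): group props by stripped name
def pvStepB (g : PySem.Dict String (List (List (String × Option String))))
    (prop : List (String × Option String)) : PySem.Dict String (List (List (String × Option String))) :=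
  let name := pv_name_of prop
  if name ≠ "" then PySem.Dict.modify g name [] (· ++ [(PySem.Dict.ofList prop).items]) else g

-- first maximal element of a group
def pvBest (its : List (List (String × Option String))) : List (String × Option String) :=
  PySem.List.maxD its google_count []

-- B's per-name value: best over the whole list's matching props
def pvFull (gd : List (List (String × Option String))) (n : String) :
    List (String × Option String) :=
  PySem.List.maxD ((gd.filter (fun q => pv_name_of q == n)).map (fun q => (PySem.Dict.ofList q).items))
    google_count []

-- A's lookup dict is the groups dict with every group reduced to its first maximum
def pvMapB (g : PySem.Dict String (List (List (String × Option String)))) :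
    PySem.Dict String (List (String × Option String)) :=
  PySem.Dict.mk (g.items.map (fun p => (p.1, pvBest p.2)))

-- B's result dict is the groups dict with every key mapped to its full-list best
def pvMapF (gd : List (List (String × Option String)))
    (g : PySem.Dict String (List (List (String × Option String)))) :
    PySem.Dict String (List (String × Option String)) :=
  PySem.Dict.mk (g.items.map (fun p => (p.1, pvFull gd p.1)))

-- invariant of the groups accumulator
def pvInv (g : PySem.Dict String (List (List (String × Option String)))) : Prop :=
  g.keys.Nodup ∧ (∀ p ∈ g.items, p.2 ≠ []) ∧ (∀ p ∈ g.items, p.1 ≠ "")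

lemma pv_max_go_isSome {α : Type} (key : α → Int) (l : List α) : ∀ (m : α),
    (List.foldl (fun acc x => match acc with
      | none => some x
      | some m => if key m < key x then some x else some m) (some m) l).isSome := by
  induction l with
  | nil => intro m; rfl
  | cons a t ih =>
      intro m
      by_cases h : key m < key a
      · simpa [List.foldl, h] using ih a
      · simpa [List.foldl, h] using ih m

lemma pv_max?_eq_some {α : Type} (key : α → Int) (l : List α) (h : l ≠ []) :
    ∃ m, PySem.List.max? l key = some m := by
  cases l with
  | nil => exact absurd rfl h
  | cons a t =>
      have := pv_max_go_isSome key t a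
      simpa [PySem.List.max?, List.foldl, Option.isSome_iff_exists] using this

lemma pvBest_singleton (x : List (String × Option String)) : pvBest [x] = x := rfl

lemma pvBest_append (its : List (List (String × Option String))) (x : List (String × Option String))
    (h : its ≠ []) :
    pvBest (its ++ [x]) =
      if google_count (pvBest its) < google_count x then x else pvBest its := by
  obtain ⟨m, hm⟩ := pv_max?_eq_some google_count its h
  have hstep : PySem.List.max? (its ++ [x]) google_count =
      if google_count m < google_count x then some x else some m := by
    simp only [PySem.List.max?] at hm ⊢
    rw [List.foldl_append, hm]
    rfl
  by_cases hlt : google_count m < google_count x <;>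
    simp [pvBest, PySem.List.maxD, hstep, hm, hlt]

lemma pv_contains_mapB (g : PySem.Dict String (List (List (String × Option String)))) (k : String) :
    (pvMapB g).contains k = g.contains k := by
  simp [pvMapB, PySem.Dict.contains, List.any_map, Function.comp_def]

lemma pv_get?_mapB (g : PySem.Dict String (List (List (String × Option String)))) (k : String) :
    (pvMapB g).get? k = (g.get? k).map pvBest := by
  simp only [pvMapB, PySem.Dict.get?, List.find?_map]
  have : ((fun p : String × List (String × Option String) => p.1 == k) ∘
      (fun p : String × List (List (String × Option String)) => (p.1, pvBest p.2))) =
      fun p : String × List (List (String × Option String)) => p.1 == k := rfl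
  rw [this]
  cases g.items.find? (fun p => p.1 == k) <;> rfl

lemma pv_getD_mapB (g : PySem.Dict String (List (List (String × Option String)))) (k : String) :
    (pvMapB g).getD k [] = pvBest (g.getD k []) := by
  simp only [PySem.Dict.getD, pv_get?_mapB]
  cases g.get? k with
  | none => rfl
  | some v => rfl

lemma pvInv_step (g : PySem.Dict String (List (List (String × Option String))))
    (prop : List (String × Option String)) (h : pvInv g) : pvInv (pvStepB g prop) := by
  obtain ⟨hnd, hne, hke⟩ := h
  simp only [pvStepB]
  split
  · refine ⟨?_, ?_, ?_⟩
    · simpa [PySem.Dict.modify] using PySem.Dict.nodup_keys_insert _ _ _ hnd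
    · intro p hp
      simp only [PySem.Dict.modify] at hp
      rcases (PySem.Dict.mem_items_insert _ _ _ _).1 hp with hpe | ⟨hpm, _⟩
      · subst hpe; simp
      · exact hne _ hpm
    · intro p hp
      simp only [PySem.Dict.modify] at hp
      rcases (PySem.Dict.mem_items_insert _ _ _ _).1 hp with hpe | ⟨hpm, _⟩
      · subst hpe; simpa using ‹pv_name_of prop ≠ ""›
      · exact hke _ hpm
  · exact ⟨hnd, hne, hke⟩

lemma pvStep_eq (g : PySem.Dict String (List (List (String × Option String))))
    (prop : List (String × Option String)) (h : pvInv g) :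
    pvStepA (pvMapB g) prop = pvMapB (pvStepB g prop) := by
  obtain ⟨hnd, hne, -⟩ := h
  simp only [pvStepA, pvStepB, pv_name_of]
  set d := PySem.Dict.ofList prop with hd
  set nm := PySem.Str.strip ((PySem.Dict.getD d "property_name" (some "")).getD "") with hnm
  by_cases h0 : nm ≠ ""
  · simp only [if_pos h0, PySem.Dict.modify]
    by_cases hc : g.contains nm = true
    · -- duplicate name: A compares counts, B's grouping appends to the group
      have hA : (pvMapB g).contains nm = true := by rw [pv_contains_mapB]; exact hc
      obtain ⟨v0, hv0⟩ : ∃ v0, g.get? nm = some v0 := by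
        have := hc
        rw [PySem.Dict.contains_eq_isSome_get?] at this
        exact Option.isSome_iff_exists.1 this
      have hv0mem : (nm, v0) ∈ g.items := PySem.Dict.mem_items_of_get?_eq_some g hv0
      have hv0ne : v0 ≠ [] := hne _ hv0mem
      have hgd : g.getD nm [] = v0 := PySem.Dict.getD_of_get?_eq_some g [] hv0
      have hbm : (pvMapB g).getD nm [] = pvBest v0 := by rw [pv_getD_mapB, hgd]
      simp only [hA, Bool.true_eq_false, if_false, hbm, hgd]
      by_cases hgt : pvCountA d.items > pvCountA (pvBest v0)
      · have hgt' : google_count (pvBest v0) < google_count d.items := hgt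
        have hx : pvBest (v0 ++ [d.items]) = d.items := by
          rw [pvBest_append v0 d.items hv0ne, if_pos hgt']
        simp only [if_pos hgt]
        apply PySem.Dict.ext
        rw [PySem.Dict.items_insert_of_contains _ _ hA]
        simp only [pvMapB, PySem.Dict.items_insert_of_contains _ _ hc, List.map_map]
        apply List.map_congr_left
        intro p _
        by_cases hpeq : p.1 = nm
        · simp [hpeq, hx]
        · simp [hpeq]
      · have hgt' : ¬ google_count (pvBest v0) < google_count d.items := hgt
        have hx : pvBest (v0 ++ [d.items]) = pvBest v0 := by
          rw [pvBest_append v0 d.items hv0ne, if_neg hgt']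
        simp only [if_neg hgt]
        apply PySem.Dict.ext
        simp only [pvMapB, PySem.Dict.items_insert_of_contains _ _ hc, List.map_map]
        apply List.map_congr_left
        intro p hp
        by_cases hpeq : p.1 = nm
        · have hpv : p.2 = v0 := by
            have hmem : (p.1, p.2) ∈ g.items := by simpa using hp
            have h2 := PySem.Dict.get?_of_mem_items g hmem hnd
            rw [hpeq, hv0] at h2
            exact (Option.some_inj.mp h2).symm
          simp [hpeq, hx, hpv]
        · simp [hpeq]
    · -- first occurrence: both append a fresh entry
      have hcf : g.contains nm = false := by
        cases hcv : g.contains nm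
        · rfl
        · exact absurd hcv hc
      have hA : (pvMapB g).contains nm = false := by rw [pv_contains_mapB]; exact hcf
      have hgd : g.getD nm [] = [] := PySem.Dict.getD_of_not_contains g [] hcf
      rw [hgd, if_pos hA]
      simp only [List.nil_append]
      apply PySem.Dict.ext
      rw [PySem.Dict.items_insert_of_not_contains _ _ hA]
      simp [pvMapB, PySem.Dict.items_insert_of_not_contains _ _ hcf, pvBest_singleton]
  · simp only [if_neg h0]

lemma pvInv_empty : pvInv PySem.Dict.empty := by
  refine ⟨?_, ?_, ?_⟩
  · simp [PySem.Dict.empty, PySem.Dict.keys]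
  · intro p hp; simp [PySem.Dict.empty] at hp
  · intro p hp; simp [PySem.Dict.empty] at hp

lemma pvLoopA (gd : List (List (String × Option String))) :
    ∀ g, pvInv g →
      List.foldl pvStepA (pvMapB g) gd = pvMapB (List.foldl pvStepB g gd) := by
  induction gd with
  | nil => intro g _; rfl
  | cons a t ih =>
      intro g hg
      rw [List.foldl_cons, List.foldl_cons, pvStep_eq g a hg]
      exact ih _ (pvInv_step g a hg)

-- ===== B-side simulation =====

lemma pv_contains_mapF (gd : List (List (String × Option String)))
    (g : PySem.Dict String (List (List (String × Option String)))) (k : String) :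
    (pvMapF gd g).contains k = g.contains k := by
  simp [pvMapF, PySem.Dict.contains, List.any_map, Function.comp_def]

lemma pvStepC_eq (gd : List (List (String × Option String)))
    (g : PySem.Dict String (List (List (String × Option String))))
    (prop : List (String × Option String)) :
    pvStepC gd (pvMapF gd g) prop = pvMapF gd (pvStepB g prop) := by
  simp only [pvStepC, pvStepB]
  set n := pv_name_of prop with hn
  by_cases h0 : n ≠ ""
  · simp only [if_pos h0, PySem.Dict.modify]
    by_cases hc : g.contains n = true
    · have hF : (pvMapF gd g).contains n = true := by rw [pv_contains_mapF]; exact hc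
      have : ¬ (n ≠ "" ∧ (pvMapF gd g).contains n = false) := by
        intro ⟨_, hcf⟩; rw [hF] at hcf; exact Bool.noConfusion hcf
      rw [if_neg this]
      apply PySem.Dict.ext
      simp only [pvMapF, PySem.Dict.items_insert_of_contains _ _ hc, List.map_map]
      symm
      apply List.map_congr_left
      intro p _
      by_cases hpeq : p.1 = n
      · simp [hpeq]
      · simp [hpeq]
    · have hcf : g.contains n = false := by
        cases hcv : g.contains n
        · rfl
        · exact absurd hcv hc
      have hF : (pvMapF gd g).contains n = false := by rw [pv_contains_mapF]; exact hcf
      rw [if_pos ⟨h0, hF⟩]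
      apply PySem.Dict.ext
      rw [PySem.Dict.items_insert_of_not_contains _ _ hF]
      simp [pvMapF, PySem.Dict.items_insert_of_not_contains _ _ hcf, pvFull]
  · have hni : ¬ (n ≠ "" ∧ (pvMapF gd g).contains n = false) := fun h => h0 h.1
    rw [if_neg hni, if_neg h0]

lemma pvLoopB (gd rest : List (List (String × Option String))) :
    ∀ g, List.foldl (pvStepC gd) (pvMapF gd g) rest = pvMapF gd (List.foldl pvStepB g rest) := by
  induction rest with
  | nil => intro g; rfl
  | cons a t ih =>
      intro g
      rw [List.foldl_cons, List.foldl_cons, pvStepC_eq gd g a]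
      exact ih _

-- the group of a nonempty name is exactly the matching props of the whole list, in order
lemma pv_getD_groups (rest : List (List (String × Option String))) (n : String) (hn : n ≠ "") :
    ∀ g : PySem.Dict String (List (List (String × Option String))),
      (List.foldl pvStepB g rest).getD n [] =
        g.getD n [] ++ (rest.filter (fun q => pv_name_of q == n)).map
          (fun q => (PySem.Dict.ofList q).items) := by
  induction rest with
  | nil => intro g; simp
  | cons q t ih =>
      intro g
      rw [List.foldl_cons]
      by_cases hq : pv_name_of q = n
      · have hq0 : pv_name_of q ≠ "" := by rw [hq]; exact hn
        have hstep : pvStepB g q =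
            PySem.Dict.modify g n [] (· ++ [(PySem.Dict.ofList q).items]) := by
          simp only [pvStepB, hq]
          rw [if_pos hn]
        rw [hstep, ih, PySem.Dict.getD_modify_self]
        simp [hq]
      · have hfil : (List.filter (fun q' => pv_name_of q' == n) (q :: t)) =
            List.filter (fun q' => pv_name_of q' == n) t := by
          simp [hq]
        rw [hfil]
        by_cases hq0 : pv_name_of q ≠ ""
        · have hstep : pvStepB g q =
              PySem.Dict.modify g (pv_name_of q) [] (· ++ [(PySem.Dict.ofList q).items]) := by
            simp only [pvStepB, if_pos hq0]
          rw [hstep, ih, PySem.Dict.getD_modify]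
          rw [if_neg (by exact fun h => hq h.symm)]
        · have hstep : pvStepB g q = g := by simp only [pvStepB, if_neg hq0]
          rw [hstep, ih]

-- ===== VERDICT support =====

set_option maxHeartbeats 1000000 in
lemma pv_final (gd : List (List (String × Option String))) :
    create_property_lookup gd = create_property_lookup_alt gd := by
  unfold create_property_lookup create_property_lookup_alt
  set G := List.foldl pvStepB PySem.Dict.empty gd with hG
  have hEA : (PySem.Dict.empty : PySem.Dict String (List (String × Option String))) =
      pvMapB PySem.Dict.empty := rfl
  have hEB : (PySem.Dict.empty : PySem.Dict String (List (String × Option String))) =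
      pvMapF gd PySem.Dict.empty := rfl
  have hInvG : pvInv G := by
    rw [hG]
    have : ∀ (l : List (List (String × Option String)))
        (g : PySem.Dict String (List (List (String × Option String)))), pvInv g →
        pvInv (List.foldl pvStepB g l) := by
      intro l
      induction l with
      | nil => intro g hg; exact hg
      | cons a t ih => intro g hg; exact ih _ (pvInv_step g a hg)
    exact this gd _ pvInv_empty
  conv_lhs => rw [hEA]
  rw [pvLoopA gd PySem.Dict.empty pvInv_empty]
  conv_rhs => rw [hEB, pvLoopB gd gd PySem.Dict.empty]
  rw [← hG]
  obtain ⟨hnd, -, hke⟩ := hInvG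
  simp only [pvMapB, pvMapF]
  apply List.map_congr_left
  intro p hp
  have hkne : p.1 ≠ "" := hke _ hp
  have hget : G.getD p.1 [] = p.2 := by
    have hmem : (p.1, p.2) ∈ G.items := by simpa using hp
    have := PySem.Dict.get?_of_mem_items G hmem hnd
    simp [PySem.Dict.getD_eq_get?_getD, this]
  have hgrp := pv_getD_groups gd p.1 hkne PySem.Dict.empty
  rw [hget] at hgrp
  simp only [PySem.Dict.getD_empty, List.nil_append] at hgrp
  have : pvFull gd p.1 = pvBest p.2 := by
    rw [pvFull, pvBest, hgrp]
  rw [this]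

-- ===== VERDICT (by name: the statement is the Claim_ definition above) =====
set_option maxHeartbeats 2000000 in
theorem create_property_lookup_spec : Claim_equal_create_property_lookup := by
  unfold Claim_equal_create_property_lookup Spec_create_property_lookup
  exact fun gd _ _ => pv_final gd
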